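-- pv_equiv track=rewrite | github.com/DragunWF/DevSandbox | scripts/school/arithmetic_checksum.py | calculate_checksum
-- ===== SOURCE A (Python) =====
-- def split_into_blocks(binary_string, block_size):
--     return [binary_string[i:i + block_size] for i in range(0, len(binary_string), block_size)]
--
-- def calculate_checksum(binary_string, block_size):
--     blocks = split_into_blocks(binary_string, block_size)
--     # Sum the decimal values of the blocks
--     total = sum(int(block, 2) for block in blocks)
--
--     # Handle carry-over bits by wrapping around
--     while total > 0xFF:  # While total exceeds 8 bits (255 in decimal)
--         carry = total >> 8  # Get the carry bits (excess beyond 8 bits)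
--         total = (total & 0xFF) + carry  # Add carry to the lower 8 bits
--
--     # Apply 1's complement to the result
--     # Apply 1's complement to fit into 8 bits
--     ones_complement = (~total & 0xFF)
--     return ones_complement
-- ===== SOURCE B (Python) =====
-- def calculate_checksum(binary_string, block_size):
--     # One pass: peel blocks off the front of the string, no block list;
--     # carry folding replaced by a closed-form modular reduction (256 == 1 mod 255);
--     # one's complement written arithmetically.
--     total = 0
--     if block_size > 0:
--         s = binary_string
--         while s:
--             total += int(s[:block_size], 2)
--             s = s[block_size:]
--     folded = 0 if total == 0 else (total - 1) % 255 + 1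
--     return 255 - folded
-- ===== Notes on version B (the rewrite author's own statement) =====
-- stated objective: simpler
-- what changed: B peels blocks off the front of the string in one pass instead of building a block list from an index range, replaces the carry-folding while-loop by the closed-form modular reduction total -> (total-1) % 255 + 1 (using 256 = 1 mod 255), and writes the one's complement arithmetically as 255 - folded.
-- outside the precondition, e.g. on calculate_checksum('-1', 2): A returns 0, B returns 1
import Mathlib
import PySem

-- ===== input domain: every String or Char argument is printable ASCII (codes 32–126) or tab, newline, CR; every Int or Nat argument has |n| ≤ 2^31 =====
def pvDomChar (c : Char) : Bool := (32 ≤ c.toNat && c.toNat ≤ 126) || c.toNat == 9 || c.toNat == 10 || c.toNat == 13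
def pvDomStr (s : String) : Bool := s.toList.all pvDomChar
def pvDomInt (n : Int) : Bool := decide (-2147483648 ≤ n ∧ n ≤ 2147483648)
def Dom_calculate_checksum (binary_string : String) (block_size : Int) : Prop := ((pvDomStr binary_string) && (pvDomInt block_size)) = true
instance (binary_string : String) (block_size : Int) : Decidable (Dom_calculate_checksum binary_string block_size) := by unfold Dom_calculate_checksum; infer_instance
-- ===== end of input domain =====

-- B replaces A's block-list + carry-folding while-loop by a single front-peeling pass with a
-- closed-form modular reduction (256 ≡ 1 mod 255) and an arithmetic one's complement (objective: simpler).

-- ===== PORT A =====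

-- int(block, 2): exact on nonempty strings of '0'/'1' characters — all that Pre_ lets reach it
-- (Python's int(·, 2) also accepts whitespace/sign/'_'/'0b' forms; those inputs are outside Pre_).
def int2 (cs : List Char) : Int := cs.foldl (fun a c => 2 * a + (if c = '1' then 1 else 0)) 0

def split_into_blocks (binary_string : String) (block_size : Int) : List String :=
  (PySem.List.pyRange 0 (PySem.Str.len binary_string) block_size).map
    (fun i => PySem.Str.slice binary_string (some i) (some (i + block_size)))

-- the 'while total > 0xFF' carry loop of A
def carryFold (total : Int) : Int :=
  if h : 255 < total then carryFold (PySem.Int.band total 255 + (total >>> (8 : Nat))) else total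
termination_by total.toNat
decreasing_by
  rw [PySem.Int.band_of_nonneg (by omega) (by norm_num)]
  have h2 : (total : Int) >>> (8 : Nat) = ((total.toNat >>> 8 : Nat) : Int) := by
    rw [show total = ((total.toNat : Nat) : Int) by omega]; simp
  rw [h2]
  have e1 : total.toNat &&& Int.toNat 255 = total.toNat % 256 := Nat.and_two_pow_sub_one_eq_mod _ 8
  have e2 : total.toNat >>> 8 = total.toNat / 256 := by
    rw [Nat.shiftRight_eq_div_pow]
  rw [e1, e2]; omega

def calculate_checksum (binary_string : String) (block_size : Int) : Int :=
  let blocks := split_into_blocks binary_string block_size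
  let total := (blocks.map (fun b => int2 b.toList)).sum
  let total2 := carryFold total
  PySem.Int.band (Int.not total2) 255

-- ===== PORT B =====

-- 'while s: total += int(s[:block_size], 2); s = s[block_size:]'
def bLoop (block_size : Int) (s : List Char) (total : Int) : Int :=
  if s = [] then total
  else if block_size ≤ 0 then total  -- totality guard only: calculate_checksum_alt calls bLoop with 0 < block_size
  else bLoop block_size (PySem.List.slice s (some block_size) none)
         (total + int2 (PySem.List.slice s none (some block_size)))
termination_by s.length
decreasing_by
  rename_i hnil hk
  rw [PySem.List.slice_from _ (by omega)]
  have : s.length ≠ 0 := by simpa using hnil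
  have : 1 ≤ block_size.toNat := by omega
  simp only [List.length_drop]; omega

def calculate_checksum_alt (binary_string : String) (block_size : Int) : Int :=
  let total : Int := if 0 < block_size then bLoop block_size binary_string.toList 0 else 0
  let folded : Int := if total = 0 then 0 else PySem.Int.mod (total - 1) 255 + 1
  255 - folded

-- ===== PRECONDITION & SPEC =====
-- Pre_ excludes block_size = 0 (range step 0: Python A raises ValueError) and, for a positive
-- block_size, restricts the string to the function's natural domain of '0'/'1' characters: on other
-- strings A either raises ValueError in int(block, 2), or — when every block happens to parse as an
-- exotic base-2 literal such as '-1' — runs its carry loop on a negative total, an accidental value.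
def Pre_calculate_checksum (binary_string : String) (block_size : Int) : Prop :=
  block_size ≠ 0 ∧ (block_size < 0 ∨ (binary_string.toList.all fun c => c == '0' || c == '1') = true)
instance (binary_string : String) (block_size : Int) : Decidable (Pre_calculate_checksum binary_string block_size) := by unfold Pre_calculate_checksum; infer_instance

def pvWitness_calculate_checksum : String × Int := ("01", 2)

def Spec_calculate_checksum (binary_string : String) (block_size : Int) (out : Int) : Prop := out = calculate_checksum_alt binary_string block_size
instance (binary_string : String) (block_size : Int) (out : Int) : Decidable (Spec_calculate_checksum binary_string block_size out) := by unfold Spec_calculate_checksum; infer_instance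

-- ===== CLAIM (what is proved, stated in full; the proofs are below) =====
def Claim_equal_calculate_checksum : Prop := ∀ (binary_string : String) (block_size : Int), Dom_calculate_checksum binary_string block_size → Pre_calculate_checksum binary_string block_size → Spec_calculate_checksum binary_string block_size (calculate_checksum binary_string block_size)

-- ===== LEMMAS AND PROOFS =====

theorem int2_aux (cs : List Char) : ∀ a : Int, 0 ≤ a → 0 ≤ cs.foldl (fun a c => 2 * a + (if c = '1' then 1 else 0)) a := by
  induction cs with
  | nil => intro a ha; simpa using ha
  | cons c t ih => intro a ha; simp only [List.foldl_cons]; exact ih _ (by split <;> omega)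

theorem int2_nonneg (cs : List Char) : 0 ≤ int2 cs := int2_aux cs 0 le_rfl

theorem pyRange_empty_of_le (n k : Int) (hk : 0 < k) (hn : n ≤ 0) :
    PySem.List.pyRange 0 n k = [] := by
  rw [PySem.List.pyRange_of_pos _ _ hk]
  simp [show ¬ (0:Int) < n by omega]

theorem pyRange_empty_of_neg (n k : Int) (hk : k < 0) (hn : 0 ≤ n) :
    PySem.List.pyRange 0 n k = [] := by
  unfold PySem.List.pyRange
  simp only [show ¬ (k = 0) by omega, if_false]
  simp [show ¬ (0:Int) < k by omega, show ¬ n < 0 by omega]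

-- pyRange 0 n k peels its first index for a positive step
theorem pyRange_zero_cons (n k : Int) (hk : 0 < k) (hn : 0 < n) :
    PySem.List.pyRange 0 n k = 0 :: (PySem.List.pyRange 0 (n - k) k).map (· + k) := by
  rw [PySem.List.pyRange_of_pos _ _ hk, PySem.List.pyRange_of_pos _ _ hk]
  have hcount : ((n - 0 + k - 1) / k).toNat = (if (0:Int) < n - k then ((n - k - 0 + k - 1) / k).toNat else 0) + 1 := by
    by_cases h : (0:Int) < n - k
    · simp only [h, if_true]
      have : (n - 0 + k - 1) = (n - k - 0 + k - 1) + 1 * k := by ring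
      rw [this, Int.add_mul_ediv_right _ _ (by omega)]
      have h1 : 0 ≤ (n - k - 0 + k - 1) / k := Int.ediv_nonneg (by omega) (by omega)
      omega
    · simp only [h, if_false]
      have h1 : (n - 0 + k - 1) / k = 1 := by
        rw [← PySem.Int.floordiv_eq_ediv_of_pos hk]
        exact (PySem.Int.floordiv_eq_iff_of_pos hk).mpr ⟨by omega, by omega⟩
      omega
  rw [if_pos hn, hcount, List.range_succ_eq_map]
  simp only [List.map_cons, List.map_map]
  congr 1
  · simp
  apply List.map_congr_left
  intro j hj
  simp only [Function.comp_apply]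
  push_cast
  ring

-- slice of the residual string: block i+1 of l is block i of l.drop k
theorem slice_shift (l : List Char) (k i : Int) (hk : 0 < k) (hi : 0 ≤ i) :
    PySem.List.slice l (some (i + k)) (some (i + k + k)) =
      PySem.List.slice (l.drop k.toNat) (some i) (some (i + k)) := by
  rw [PySem.List.slice_toNat _ (by omega) (by omega), PySem.List.slice_toNat _ hi (by omega),
      List.drop_drop]
  have e1 : (i + k).toNat = k.toNat + i.toNat := by omega
  have e2 : (i + k + k).toNat = i.toNat + k.toNat + k.toNat := by omega
  rw [e1, e2]
  congr 1
  omega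

-- B's loop computes A's per-block sum
theorem bLoop_eq_sum (k : Int) (hk : 0 < k) (l : List Char) (acc : Int) :
    bLoop k l acc =
      acc + ((PySem.List.pyRange 0 (l.length : Int) k).map
        (fun i => int2 (PySem.List.slice l (some i) (some (i + k))))).sum := by
  by_cases hnil : l = []
  · subst hnil
    rw [bLoop, if_pos rfl]
    simp [pyRange_empty_of_le 0 k hk le_rfl]
  · rw [bLoop, if_neg hnil, if_neg (by omega)]
    rw [PySem.List.slice_from _ (by omega)]
    rw [pyRange_zero_cons (l.length : Int) k hk (by simp [List.length_pos_iff, hnil])]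
    simp only [List.map_cons, List.map_map, List.sum_cons]
    have hhead : PySem.List.slice l (some 0) (some (0 + k)) = PySem.List.slice l none (some k) := by
      rw [PySem.List.slice_toNat _ le_rfl (by omega), PySem.List.slice_to _ (by omega)]
      simp
    rw [hhead]
    have htail : ((PySem.List.pyRange 0 ((l.length : Int) - k) k).map
          ((fun i => int2 (PySem.List.slice l (some i) (some (i + k)))) ∘ (· + k))).sum =
        ((PySem.List.pyRange 0 ((l.drop k.toNat).length : Int) k).map
          (fun i => int2 (PySem.List.slice (l.drop k.toNat) (some i) (some (i + k))))).sum := by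
      by_cases hle : k ≤ (l.length : Int)
      · have hlen : ((l.drop k.toNat).length : Int) = (l.length : Int) - k := by
          simp only [List.length_drop]; omega
        rw [hlen]
        apply congrArg
        apply List.map_congr_left
        intro i hi
        have hi0 : 0 ≤ i := ((PySem.List.mem_pyRange_iff_of_pos hk i).mp hi).1
        simp only [Function.comp_apply]
        rw [slice_shift l k i hk hi0]
      · rw [pyRange_empty_of_le _ k hk (by omega), pyRange_empty_of_le _ k hk (by simp only [List.length_drop]; omega)]
        simp
    rw [htail]
    rw [bLoop_eq_sum k hk (l.drop k.toNat) _]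
    ring
termination_by l.length
decreasing_by
  simp only [List.length_drop]
  have : l.length ≠ 0 := by simpa using hnil
  have : 1 ≤ k.toNat := by omega
  omega

theorem carryFold_step (t : Int) (ht : 0 ≤ t) :
    PySem.Int.band t 255 + (t >>> (8 : Nat)) = t % 256 + t / 256 := by
  rw [PySem.Int.band_of_nonneg ht (by norm_num)]
  have h2 : t >>> (8 : Nat) = ((t.toNat >>> 8 : Nat) : Int) := by
    rw [show t = ((t.toNat : Nat) : Int) by omega]; simp
  rw [h2]
  have e1 : t.toNat &&& Int.toNat 255 = t.toNat % 256 := Nat.and_two_pow_sub_one_eq_mod _ 8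
  have e2 : t.toNat >>> 8 = t.toNat / 256 := by rw [Nat.shiftRight_eq_div_pow]
  rw [e1, e2]; omega

-- closed form of A's carry loop
theorem carryFold_closed (t : Int) (ht : 0 ≤ t) :
    carryFold t = if t = 0 then 0 else (t - 1) % 255 + 1 := by
  by_cases h : 255 < t
  · rw [carryFold, dif_pos h, carryFold_step t ht]
    have h256 : t % 256 + t / 256 < t := by omega
    have hpos : 1 ≤ t % 256 + t / 256 := by omega
    rw [carryFold_closed (t % 256 + t / 256) (by omega)]
    rw [if_neg (by omega), if_neg (by omega)]
    have : t - 1 = (t % 256 + t / 256 - 1) + 255 * (t / 256) := by omega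
    rw [this, Int.add_mul_emod_self_left]
  · rw [carryFold, dif_neg h]
    by_cases h0 : t = 0
    · simp [h0]
    · rw [if_neg h0]; omega
termination_by t.toNat
decreasing_by omega

theorem not_band_255 (t : Int) (h0 : 0 ≤ t) (h1 : t ≤ 255) :
    PySem.Int.band (Int.not t) 255 = 255 - t := by
  interval_cases t <;> decide

-- the two ports share the block sum, then closed form = carry loop
theorem agree_of_pos (s : String) (k : Int) (hk : 0 < k) :
    calculate_checksum s k = calculate_checksum_alt s k := by
  unfold calculate_checksum calculate_checksum_alt split_into_blocks
  rw [if_pos hk, bLoop_eq_sum k hk s.toList 0]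
  simp only [List.map_map, PySem.Str.len_eq, Function.comp_def]
  have hsl : ∀ i : Int, (PySem.Str.slice s (some i) (some (i + k))).toList =
      PySem.List.slice s.toList (some i) (some (i + k)) := by
    intro i
    rw [PySem.Str.toList_slice, PySem.Chars.slice_eq_listSlice]
  simp only [hsl]
  set T := ((PySem.List.pyRange 0 (s.toList.length : Int) k).map
    (fun i => int2 (PySem.List.slice s.toList (some i) (some (i + k))))).sum with hT
  have hT0 : 0 ≤ T := by
    apply List.sum_nonneg
    intro x hx
    obtain ⟨i, _, rfl⟩ := List.mem_map.mp hx
    exact int2_nonneg _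
  rw [carryFold_closed T hT0, zero_add]
  by_cases h0 : T = 0
  · simp [h0]
    decide
  · rw [if_neg h0, if_neg h0, not_band_255 _ (by omega) (by omega),
        PySem.Int.mod_eq_emod_of_pos (by norm_num)]

theorem agree_of_neg (s : String) (k : Int) (hk : k < 0) :
    calculate_checksum s k = calculate_checksum_alt s k := by
  unfold calculate_checksum calculate_checksum_alt split_into_blocks
  rw [if_neg (by omega), PySem.Str.len_eq, pyRange_empty_of_neg _ k hk (by positivity)]
  simp only [List.map_nil, List.sum_nil]
  rw [carryFold, dif_neg (by norm_num)]
  decide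

-- ===== VERDICT (by name: the statement is the Claim_ definition above) =====
theorem calculate_checksum_spec : Claim_equal_calculate_checksum := by
  intro s k _ hpre
  unfold Spec_calculate_checksum
  rcases lt_trichotomy k 0 with hk | hk | hk
  · exact agree_of_neg s k hk
  · exact absurd hk hpre.1
  · exact agree_of_pos s k hk
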